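-- pv_equiv track=rewrite | github.com/jasdepw/online-judge | Exhaustive search_Question_1.py | solution
-- ===== SOURCE A (Python) =====
-- def solution(answers):
--     answer = []
--     supoja1 = [1, 2, 3, 4, 5]
--     supoja2 = [2, 1, 2, 3, 2, 4, 2, 5]
--     supoja3 = [3, 3, 1, 1, 2, 2, 4, 4, 5, 5]
--     cc = [0, 0, 0]
--
--     for i in range(len(answers)):
--         n1 = 5
--         if answers[i] == supoja1[i%n1]:
--             cc[0] += 1
--
--     for j in range(len(answers)):
--         n2 = 8
--         if answers[j] == supoja2[j%n2]:
--             cc[1] += 1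
--
--     for k in range(len(answers)):
--         n3 = 10
--         if answers[k] == supoja3[k%n3]:
--             cc[2] += 1
--
--     m_sp = max(cc)
--
--     for i in range(0, 3):
--         if cc[i] == m_sp:
--             answer.append(i+1)
--
--     return answer
-- ===== SOURCE B (Python) =====
-- def solution(answers):
--     # Hash index: count occurrences of each (position mod 40, answer) pair once
--     # (40 = lcm of the three pattern periods), then score each pattern by 40 lookups.
--     freq = {}
--     for i, a in enumerate(answers):
--         key = (i % 40, a)
--         freq[key] = freq.get(key, 0) + 1
--     patterns = [[1, 2, 3, 4, 5],
--                 [2, 1, 2, 3, 2, 4, 2, 5],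
--                 [3, 3, 1, 1, 2, 2, 4, 4, 5, 5]]
--     cc = [sum(freq.get((r, p[r % len(p)]), 0) for r in range(40)) for p in patterns]
--     m = max(cc)
--     return [i + 1 for i, c in enumerate(cc) if c == m]
-- ===== Notes on version B (the rewrite author's own statement) =====
-- stated objective: alternative
-- what changed: B builds a frequency dictionary keyed by (index mod 40, answer) in one pass (40 = lcm of the pattern periods) and then scores each pattern by 40 dictionary lookups, so the per-element comparisons against the patterns disappear, replacing A's three unrolled index loops that compare every answer against a hardcoded pattern entry.
import Mathlib
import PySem

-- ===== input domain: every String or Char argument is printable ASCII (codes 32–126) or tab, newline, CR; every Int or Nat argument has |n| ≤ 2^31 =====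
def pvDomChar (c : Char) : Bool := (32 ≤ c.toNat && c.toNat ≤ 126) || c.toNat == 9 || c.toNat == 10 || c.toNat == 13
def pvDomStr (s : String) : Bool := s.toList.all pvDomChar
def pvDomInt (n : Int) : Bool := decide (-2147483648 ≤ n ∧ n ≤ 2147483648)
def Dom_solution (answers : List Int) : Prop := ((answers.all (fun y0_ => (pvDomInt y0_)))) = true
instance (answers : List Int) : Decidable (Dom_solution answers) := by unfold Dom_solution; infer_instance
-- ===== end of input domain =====

-- B replaces A's three pattern-comparison loops by a frequency dictionary keyed by
-- (index mod 40, answer) built in one pass, each pattern then scored by 40 dictionary lookups;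
-- equality of the return values is proved.

-- ===== PORT A =====
-- answers[i] and supoja[i % n] are always in range, so pyGetD is exact here.
def solution (answers : List Int) : List Int :=
  let supoja1 : List Int := [1, 2, 3, 4, 5]
  let supoja2 : List Int := [2, 1, 2, 3, 2, 4, 2, 5]
  let supoja3 : List Int := [3, 3, 1, 1, 2, 2, 4, 4, 5, 5]
  let n : Int := PySem.List.len answers
  let cc0 : Int := (PySem.List.pyRange 0 n 1).foldl
    (fun c i => if PySem.List.pyGetD answers i 0 = PySem.List.pyGetD supoja1 (PySem.Int.mod i 5) 0 then c + 1 else c) 0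
  let cc1 : Int := (PySem.List.pyRange 0 n 1).foldl
    (fun c j => if PySem.List.pyGetD answers j 0 = PySem.List.pyGetD supoja2 (PySem.Int.mod j 8) 0 then c + 1 else c) 0
  let cc2 : Int := (PySem.List.pyRange 0 n 1).foldl
    (fun c k => if PySem.List.pyGetD answers k 0 = PySem.List.pyGetD supoja3 (PySem.Int.mod k 10) 0 then c + 1 else c) 0
  let cc : List Int := [cc0, cc1, cc2]
  let m_sp : Int := (PySem.List.max? cc (fun x => x)).getD 0   -- max(cc); cc is nonempty, so exact
  (PySem.List.pyRange 0 3 1).foldl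
    (fun ans i => if PySem.List.pyGetD cc i 0 = m_sp then ans ++ [i + 1] else ans) []

-- ===== PORT B =====
def solution_alt (answers : List Int) : List Int :=
  let freq : PySem.Dict (Int × Int) Int :=
    (PySem.List.enumerate answers 0).foldl
      (fun d ia =>
        let key : Int × Int := (PySem.Int.mod ia.1 40, ia.2)
        d.insert key (d.getD key 0 + 1))
      PySem.Dict.empty
  let patterns : List (List Int) :=
    [[1, 2, 3, 4, 5], [2, 1, 2, 3, 2, 4, 2, 5], [3, 3, 1, 1, 2, 2, 4, 4, 5, 5]]
  let cc : List Int := patterns.map (fun p =>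
    ((PySem.List.pyRange 0 40 1).map (fun r =>
      freq.getD (r, PySem.List.pyGetD p (PySem.Int.mod r (PySem.List.len p)) 0) 0)).sum)
  let m : Int := (PySem.List.max? cc (fun x => x)).getD 0   -- max(cc); cc is nonempty, so exact
  (PySem.List.enumerate cc 0).filterMap (fun ic => if ic.2 = m then some (ic.1 + 1) else none)

-- ===== PRECONDITION & SPEC =====
def Spec_solution (answers : List Int) (out : List Int) : Prop := out = solution_alt answers
instance (answers : List Int) (out : List Int) : Decidable (Spec_solution answers out) := by unfold Spec_solution; infer_instance

-- ===== CLAIM (what is proved, stated in full; the proofs are below) =====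
def Claim_equal_solution : Prop := ∀ (answers : List Int), Dom_solution answers → Spec_solution answers (solution answers)

-- ===== LEMMAS AND PROOFS =====

-- the 0/1-indicator sum over the 40 residues picks out exactly the residue of s
lemma indicator_sum (v : Int → Int) (s a : Int) (hs : 0 ≤ s)
    (hv : ∀ i : Int, 0 ≤ i → v (PySem.Int.mod i 40) = v i) :
    ((PySem.List.pyRange 0 40 1).map
      (fun r => if (PySem.Int.mod s 40, a) = (r, v r) then (1:Int) else 0)).sum
    = if a = v s then 1 else 0 := by
  have hsum := PySem.List.sum_map_ite_one_zero
    (fun r : Int => decide ((PySem.Int.mod s 40, a) = (r, v r))) (PySem.List.pyRange 0 40 1)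
  simp only [decide_eq_true_eq] at hsum
  rw [hsum]
  have hm0 : 0 ≤ PySem.Int.mod s 40 := PySem.Int.mod_nonneg s (by norm_num)
  have hm40 : PySem.Int.mod s 40 < 40 := PySem.Int.mod_lt s (by norm_num)
  have hmem : PySem.Int.mod s 40 ∈ PySem.List.pyRange 0 40 1 :=
    PySem.List.mem_pyRange_one.mpr ⟨hm0, hm40⟩
  have hvm : v (PySem.Int.mod s 40) = v s := hv s hs
  by_cases h : a = v s
  · have hcongr : (PySem.List.pyRange 0 40 1).countP
        (fun r : Int => decide ((PySem.Int.mod s 40, a) = (r, v r)))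
        = (PySem.List.pyRange 0 40 1).countP (· == PySem.Int.mod s 40) := by
      apply List.countP_congr
      intro x _
      simp only [decide_eq_true_eq, beq_iff_eq, Prod.mk.injEq]
      constructor
      · rintro ⟨h1, _⟩; omega
      · rintro h1; subst h1; exact ⟨rfl, by rw [hvm, ← h]⟩
    rw [hcongr, ← List.count_eq_countP,
        List.count_eq_one_of_mem (PySem.List.nodup_pyRange_one 0 40) hmem]
    simp [h]
  · have hzero : (PySem.List.pyRange 0 40 1).countP
        (fun r : Int => decide ((PySem.Int.mod s 40, a) = (r, v r))) = 0 := by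
      rw [List.countP_eq_zero]
      intro x _
      simp only [decide_eq_true_eq, Prod.mk.injEq, not_and]
      intro h1
      subst h1
      rw [hvm]
      exact fun hh => h hh
    rw [hzero]
    simp [h]

-- master lemma: the sum of counter lookups over the 40 residues equals the match count
lemma master (v : Int → Int) (hv : ∀ i : Int, 0 ≤ i → v (PySem.Int.mod i 40) = v i) :
    ∀ (answers : List Int) (s : Int), 0 ≤ s →
    ((PySem.List.pyRange 0 40 1).map (fun r =>
        (((PySem.List.enumerate answers s).map (fun ia => (PySem.Int.mod ia.1 40, ia.2))).count (r, v r) : Int))).sum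
    = ((PySem.List.enumerate answers s).countP (fun ia => ia.2 = v ia.1) : Int) := by
  intro answers
  induction answers with
  | nil =>
    intro s hs
    simp [PySem.List.enumerate_nil, List.map_const']
  | cons a rest ih =>
    intro s hs
    rw [PySem.List.enumerate_cons]
    simp only [List.map_cons, List.countP_cons, List.count_cons]
    push_cast
    have hsplit : (List.map (fun r =>
        ((((PySem.List.enumerate rest (s + 1)).map (fun ia => (PySem.Int.mod ia.1 40, ia.2))).count (r, v r) : Int)
          + if ((PySem.Int.mod s 40, a) == (r, v r)) = true then (1:Int) else 0)) (PySem.List.pyRange 0 40 1)).sum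
        = (List.map (fun r =>
            ((((PySem.List.enumerate rest (s + 1)).map (fun ia => (PySem.Int.mod ia.1 40, ia.2))).count (r, v r) : Int)))
            (PySem.List.pyRange 0 40 1)).sum
        + (List.map (fun r => if ((PySem.Int.mod s 40, a) == (r, v r)) = true then (1:Int) else 0)
            (PySem.List.pyRange 0 40 1)).sum :=
      PySem.List.sum_map_add_int _ _ _
    rw [hsplit, ih (s + 1) (by omega)]
    have hind := indicator_sum v s a hs hv
    simp only [beq_iff_eq]
    rw [hind]
    simp

-- per-pattern equality of A's loop count and B's sum of dictionary lookups
lemma cc_eq (p : List Int) (L : Int) (hpos : 0 < L) (hdvd : L ∣ 40) (answers : List Int) :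
    (PySem.List.pyRange 0 (PySem.List.len answers) 1).foldl
      (fun c i => if PySem.List.pyGetD answers i 0 = PySem.List.pyGetD p (PySem.Int.mod i L) 0 then c + 1 else c) (0:Int)
    = ((PySem.List.pyRange 0 40 1).map (fun r =>
        ((PySem.List.enumerate answers 0).foldl
          (fun d ia =>
            let key : Int × Int := (PySem.Int.mod ia.1 40, ia.2)
            d.insert key (d.getD key 0 + 1))
          PySem.Dict.empty).getD (r, PySem.List.pyGetD p (PySem.Int.mod r L) 0) 0)).sum := by
  have hv : ∀ i : Int, 0 ≤ i →
      PySem.List.pyGetD p (PySem.Int.mod (PySem.Int.mod i 40) L) 0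
        = PySem.List.pyGetD p (PySem.Int.mod i L) 0 := by
    intro i _
    rw [PySem.Int.mod_eq_emod_of_pos hpos, PySem.Int.mod_eq_emod_of_pos (by norm_num : (0:Int) < 40),
        PySem.Int.mod_eq_emod_of_pos hpos, Int.emod_emod_of_dvd i hdvd]
  -- B side: each dictionary lookup is a count of the key in the mapped index/answer list
  have hB : (fun r : Int =>
      ((PySem.List.enumerate answers 0).foldl
        (fun d ia =>
          let key : Int × Int := (PySem.Int.mod ia.1 40, ia.2)
          d.insert key (d.getD key 0 + 1))
        PySem.Dict.empty).getD (r, PySem.List.pyGetD p (PySem.Int.mod r L) 0) 0)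
      = (fun r : Int =>
        (((PySem.List.enumerate answers 0).map (fun ia => (PySem.Int.mod ia.1 40, ia.2))).count
          (r, PySem.List.pyGetD p (PySem.Int.mod r L) 0) : Int)) := by
    funext r
    rw [← List.foldl_map (f := fun ia : Int × Int => (PySem.Int.mod ia.1 40, ia.2))
          (g := fun (d : PySem.Dict (Int × Int) Int) k => d.insert k (d.getD k 0 + 1)),
        PySem.Dict.getD_foldl_insert_add_one]
    simp [PySem.Dict.getD_empty]
  rw [hB, master (fun i => PySem.List.pyGetD p (PySem.Int.mod i L) 0) hv answers 0 le_rfl]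
  -- A side: the index loop is a countP over enumerate
  rw [PySem.List.enumerate_eq_map_pyRange answers 0, List.countP_map]
  have := PySem.List.foldl_count_if
    (fun j : Int => decide (PySem.List.pyGetD answers j 0 = PySem.List.pyGetD p (PySem.Int.mod j L) 0))
    (PySem.List.pyRange 0 (PySem.List.len answers) 1) 0
  simp only [decide_eq_true_eq] at this
  rw [this]
  simp only [zero_add, Function.comp_def]

lemma tail_eq (a b c m : Int) :
    (PySem.List.pyRange 0 3 1).foldl
      (fun ans i => if PySem.List.pyGetD [a, b, c] i 0 = m then ans ++ [i + 1] else ans) ([] : List Int)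
    = (PySem.List.enumerate [a, b, c] 0).filterMap (fun ic => if ic.2 = m then some (ic.1 + 1) else none) := by
  have h3 : PySem.List.pyRange 0 3 1 = [0, 1, 2] := by decide
  rw [h3]
  simp only [List.foldl, PySem.List.enumerate_cons, PySem.List.enumerate_nil, List.filterMap]
  norm_num [PySem.List.pyGetD, PySem.List.pyGet?, PySem.List.pyIdx?]
  simp only [show Int.toNat 2 = 2 from rfl, List.getElem_cons_succ, List.getElem_cons_zero]
  split_ifs <;> rfl

-- ===== VERDICT (by name: the statement is the Claim_ definition above) =====
theorem solution_spec : Claim_equal_solution := by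
  intro answers _
  show solution answers = solution_alt answers
  simp only [solution, solution_alt, List.map]
  rw [cc_eq [1,2,3,4,5] 5 (by norm_num) (by norm_num) answers,
      cc_eq [2,1,2,3,2,4,2,5] 8 (by norm_num) (by norm_num) answers,
      cc_eq [3,3,1,1,2,2,4,4,5,5] 10 (by norm_num) (by norm_num) answers]
  norm_num [PySem.List.len_eq]
  exact tail_eq _ _ _ _
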